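-- pv_equiv track=rewrite | github.com/Bjoergermeister/AdventOfCode2019 | Day3/Day3.py | calculateIntersectionPoints
-- ===== SOURCE A (Python) =====
-- import math
--
-- intersections = []
--
-- class Line:
--
--     def __init__(self, p1, p2):
--         self.x1 = p1[0]
--         self.y1 = p1[1]
--         self.x2 = p2[0]
--         self.y2 = p2[1]
--
--     def __len__(self):
--         diffX = abs(self.x2 - self.x1)
--         diffY = abs(self.y2 - self.y1)
--
--         return (int)(math.sqrt(diffX * diffX + diffY * diffY))
--
--     def isX(self) -> bool:
--         return (self.x1 != self.x2)
--
--     def isY(self) -> bool: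
--         return (self.y1 != self.y2)
--
--     def containsPoint(self, point) -> bool:
--         if (self.isX()):
--             if (point[1] != self.y1):
--                 return False
--             if ((point[0] <= self.x1 and point[0] >= self.x2) or (point[0] >= self.x1 and point[0] <= self.x2)):
--                 return True
--
--         if (self.isY()):
--             if (point[0] != self.x1):
--                 return False
--             if ((point[1] <= self.y1 and point[1] >= self.y2) or (point[1] >= self.y1 and point[1] <= self.y2)):
--                 return True
--
--         return False
--
--     def distanceFromLineStartToPoint(self, point) -> int:
--         if (self.isY()):
--             return abs(self.y1 - point[1])
--         if (self.isX()):
--             return abs(self.x1 - point[0])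
--
-- def getIntersectionPoint(l1, l2):
--     if (l1.isX()):
--         x = (l1.x1 < l2.x1 and l1.x2 > l2.x1 or l1.x1 > l2.x1 and l1.x2 < l2.x1)
--         y = (l2.y1 < l1.y1 and l2.y2 > l1.y1 or l2.y1 > l1.y1 and l2.y2 < l1.y1)
--         if not(x and y):
--             return None
--     else:
--         x = (l2.x1 < l1.x1 and l2.x2 > l1.x1 or l2.x1 > l1.x1 and l2.x2 < l1.x1)
--         y = (l1.y1 < l2.y1 and l1.y2 > l2.y1 or l1.y1 > l2.y1 and l1.y2 < l2.y1)
--         if not(x and y):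
--             return None
--
--     x = l1.x1 if (l1.x1 == l1.x2) else l2.x1
--     y = l1.y1 if (l1.y1 == l1.y2) else l2.y1
--
--     intersections.append((x, y))
--     return (x, y)
--
-- def calculateIntersectionPoints(line1, line2):
--     points = []
--
--     for i in range(len(line1) - 1):
--         firstSegment = Line(line1[i], line1[i + 1])
--         for j in range(len(line2) - 1):
--             secondSegment = Line(line2[j], line2[j + 1])
--
--             intersectionPoint = getIntersectionPoint(firstSegment, secondSegment)
--             if intersectionPoint is not None:
--                 points.append(intersectionPoint)
--     return points
-- ===== SOURCE B (Python) =====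
-- from bisect import bisect_left, bisect_right
--
--
-- def calculateIntersectionPoints(line1, line2):
--     # Index line2's segments once: sort them by their start x so each
--     # non-vertical line1 segment can range-query candidates via bisect
--     # instead of scanning all of line2; a prefiltered list serves the
--     # vertical case.  Matches are re-ordered by segment index j so the
--     # output order equals the nested-loop order.
--     segs2 = [(j, line2[j], line2[j + 1]) for j in range(len(line2) - 1)]
--     byx = sorted(segs2, key=lambda e: e[1][0])
--     xs = [c[0] for _, c, _ in byx]
--     spanning = [e for e in segs2 if e[1][0] != e[2][0]]
--
--     points = []
--     for i in range(len(line1) - 1):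
--         p, q = line1[i], line1[i + 1]
--         (px, py), (qx, qy) = p, q
--         if px != qx:
--             lo, hi = (px, qx) if px < qx else (qx, px)
--             hits = []
--             for j, (rx, ry), (sx, sy) in byx[bisect_right(xs, lo):bisect_left(xs, hi)]:
--                 if ry < py < sy or sy < py < ry:
--                     hits.append((j, (rx, py if py == qy else ry)))
--             hits.sort(key=lambda e: e[0])
--             points.extend(pt for _, pt in hits)
--         else:
--             for j, (rx, ry), (sx, sy) in spanning:
--                 if (rx < px < sx or sx < px < rx) and (py < ry < qy or qy < ry < py):
--                     points.append((px, ry))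
--     return points
-- ===== Notes on version B (the rewrite author's own statement) =====
-- stated objective: faster
-- what changed: Replaces the nested all-pairs scan with a one-time index of line2's segments (sorted by start x, queried via bisect for each non-vertical line1 segment; a prefiltered x-spanning sublist serves vertical segments), re-sorting each query's matches by segment index to restore the nested-loop output order.
import Mathlib
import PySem

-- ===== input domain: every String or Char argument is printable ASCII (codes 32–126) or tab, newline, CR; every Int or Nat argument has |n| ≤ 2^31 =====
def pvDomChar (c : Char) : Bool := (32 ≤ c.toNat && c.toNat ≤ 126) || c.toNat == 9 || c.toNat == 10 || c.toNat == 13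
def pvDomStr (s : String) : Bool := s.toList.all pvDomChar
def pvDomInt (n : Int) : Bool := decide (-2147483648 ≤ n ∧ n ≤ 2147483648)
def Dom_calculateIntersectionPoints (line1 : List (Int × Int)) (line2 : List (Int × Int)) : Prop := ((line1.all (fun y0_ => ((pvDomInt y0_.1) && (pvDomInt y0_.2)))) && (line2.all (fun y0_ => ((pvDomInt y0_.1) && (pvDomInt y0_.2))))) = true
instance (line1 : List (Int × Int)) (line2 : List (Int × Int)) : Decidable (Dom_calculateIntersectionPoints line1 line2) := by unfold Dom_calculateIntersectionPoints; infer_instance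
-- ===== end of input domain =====

-- B indexes line2's segments once (sorted by start x, bisect range queries; a prefiltered
-- x-spanning sublist for the vertical case) instead of A's all-pairs inner scan; matches are
-- re-sorted by segment index so the output order equals A's nested-loop order.
-- A also appends each found point to a module-global list `intersections`; the ports and the
-- equivalence are about the RETURN value only (B performs no such mutation).

-- ===== PORT A =====
structure LineA where
  x1 : Int
  y1 : Int
  x2 : Int
  y2 : Int
deriving Repr, DecidableEq

def mkLineA (p1 p2 : Int × Int) : LineA := ⟨p1.1, p1.2, p2.1, p2.2⟩

def LineA.isX (l : LineA) : Bool := l.x1 != l.x2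

-- A's getIntersectionPoint; the Python also appends to the global `intersections`
-- (a side effect, not part of the return value): omitted here.
def getIntersectionPoint (l1 l2 : LineA) : Option (Int × Int) :=
  let ok : Bool :=
    if l1.isX then
      let x := (l1.x1 < l2.x1 && l1.x2 > l2.x1) || (l1.x1 > l2.x1 && l1.x2 < l2.x1)
      let y := (l2.y1 < l1.y1 && l2.y2 > l1.y1) || (l2.y1 > l1.y1 && l2.y2 < l1.y1)
      x && y
    else
      let x := (l2.x1 < l1.x1 && l2.x2 > l1.x1) || (l2.x1 > l1.x1 && l2.x2 < l1.x1)
      let y := (l1.y1 < l2.y1 && l1.y2 > l2.y1) || (l1.y1 > l2.y1 && l1.y2 < l2.y1)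
      x && y
  if ok then
    some ((if l1.x1 == l1.x2 then l1.x1 else l2.x1),
          (if l1.y1 == l1.y2 then l1.y1 else l2.y1))
  else
    none

def calculateIntersectionPoints (line1 : List (Int × Int)) (line2 : List (Int × Int)) : List (Int × Int) :=
  (List.range (line1.length - 1)).foldl (fun points i =>
    let firstSegment := mkLineA (line1.getD i (0, 0)) (line1.getD (i + 1) (0, 0))
    (List.range (line2.length - 1)).foldl (fun points j =>
      let secondSegment := mkLineA (line2.getD j (0, 0)) (line2.getD (j + 1) (0, 0))
      match getIntersectionPoint firstSegment secondSegment with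
      | some p => points ++ [p]
      | none => points) points) []

-- ===== PORT B =====
-- Source B: segs2 = [(j, line2[j], line2[j+1]) for j in range(len(line2)-1)]
def pvSegs2 (line2 : List (Int × Int)) : List (Nat × (Int × Int) × (Int × Int)) :=
  (List.range (line2.length - 1)).map (fun j => (j, line2.getD j (0, 0), line2.getD (j + 1) (0, 0)))

def calculateIntersectionPoints_alt (line1 : List (Int × Int)) (line2 : List (Int × Int)) : List (Int × Int) :=
  let segs2 := pvSegs2 line2
  let byx := PySem.List.sorted segs2 (fun e => e.2.1.1)
  let xs := byx.map (fun e => e.2.1.1)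
  let spanning := segs2.filter (fun e => e.2.1.1 != e.2.2.1)
  (List.range (line1.length - 1)).foldl (fun points i =>
    let p := line1.getD i (0, 0)
    let q := line1.getD (i + 1) (0, 0)
    if p.1 != q.1 then
      let lo := if p.1 < q.1 then p.1 else q.1
      let hi := if p.1 < q.1 then q.1 else p.1
      -- byx[bisect_right(xs, lo):bisect_left(xs, hi)] — Python slice with Nat bounds ≤ len is drop/take (PySem.List.slice_natCast)
      let cand := (byx.drop (PySem.List.bisectRight xs lo)).take
                    (PySem.List.bisectLeft xs hi - PySem.List.bisectRight xs lo)
      let hits := cand.foldl (fun h e =>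
        if (e.2.1.2 < p.2 && p.2 < e.2.2.2) || (e.2.2.2 < p.2 && p.2 < e.2.1.2) then
          h ++ [(e.1, (e.2.1.1, if p.2 == q.2 then p.2 else e.2.1.2))]
        else h) []
      points ++ (PySem.List.sorted hits (fun e => e.1)).map (·.2)
    else
      spanning.foldl (fun pts e =>
        if ((e.2.1.1 < p.1 && p.1 < e.2.2.1) || (e.2.2.1 < p.1 && p.1 < e.2.1.1)) &&
           ((p.2 < e.2.1.2 && e.2.1.2 < q.2) || (q.2 < e.2.1.2 && e.2.1.2 < p.2)) then
          pts ++ [(p.1, e.2.1.2)]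
        else pts) points) []

-- ===== PRECONDITION & SPEC =====
def Spec_calculateIntersectionPoints (line1 : List (Int × Int)) (line2 : List (Int × Int)) (out : List (Int × Int)) : Prop := out = calculateIntersectionPoints_alt line1 line2
instance (line1 : List (Int × Int)) (line2 : List (Int × Int)) (out : List (Int × Int)) : Decidable (Spec_calculateIntersectionPoints line1 line2 out) := by unfold Spec_calculateIntersectionPoints; infer_instance

-- ===== CLAIM (what is proved, stated in full; the proofs are below) =====
def Claim_equal_calculateIntersectionPoints : Prop := ∀ (line1 : List (Int × Int)) (line2 : List (Int × Int)), Dom_calculateIntersectionPoints line1 line2 → Spec_calculateIntersectionPoints line1 line2 (calculateIntersectionPoints line1 line2)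

-- ===== LEMMAS AND PROOFS =====


-- A's per-pair result, as a list
def gA (p q : Int × Int) (e : Nat × (Int × Int) × (Int × Int)) : List (Int × Int) :=
  (getIntersectionPoint (mkLineA p q) (mkLineA e.2.1 e.2.2)).toList

-- a flatMap whose blocks are singletons-or-empty is a filter-then-map
theorem flatMap_eq_filter_map {a b : Type} (l : List a) (g : a → List b) (p : a → Bool) (f : a → b)
    (h : ∀ e ∈ l, g e = if p e then [f e] else []) :
    l.flatMap g = (l.filter p).map f := by
  induction l with
  | nil => simp
  | cons x t ih =>
    have hx := h x (by simp)
    have ht := ih (fun e he => h e (by simp [he]))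
    by_cases hp : p x = true
    · simp [hp, hx, ht]
    · simp [hp, hx, ht]

-- a drop/take window whose boundary indices bracket exactly the elements with lo < k e < hi is a filter
theorem drop_take_eq_filter {a : Type} (l : List a) (k : a → Int) (lo hi : Int) (ia ib : Nat)
    (ha : ia ≤ l.length) (_hb : ib ≤ l.length) (hlh : lo < hi)
    (hA : ∀ (j : Nat) (hj : j < l.length), (j < ia → k l[j] ≤ lo) ∧ (ia ≤ j → lo < k l[j]))
    (hB : ∀ (j : Nat) (hj : j < l.length), (j < ib → k l[j] < hi) ∧ (ib ≤ j → hi ≤ k l[j])) :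
    (l.drop ia).take (ib - ia) = l.filter (fun e => decide (lo < k e) && decide (k e < hi)) := by
  have hab : ia ≤ ib := by
    by_contra hc
    rw [Nat.not_le] at hc
    have hblen : ib < l.length := lt_of_lt_of_le hc ha
    have h1 := (hA ib hblen).1 hc
    have h2 := (hB ib hblen).2 le_rfl
    omega
  have hsplit : l = l.take ia ++ ((l.drop ia).take (ib - ia) ++ (l.drop ia).drop (ib - ia)) := by
    rw [List.take_append_drop, List.take_append_drop]
  conv_rhs => rw [hsplit]
  rw [List.filter_append, List.filter_append]
  have h1 : (l.take ia).filter (fun e => decide (lo < k e) && decide (k e < hi)) = [] := by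
    rw [List.filter_eq_nil_iff]
    intro e he
    rw [List.mem_take_iff_getElem] at he
    obtain ⟨j, hj, rfl⟩ := he
    have := (hA j (by omega)).1 (by omega)
    simp only [Bool.and_eq_true, decide_eq_true_eq, not_and]
    omega
  have h3 : ((l.drop ia).drop (ib - ia)).filter (fun e => decide (lo < k e) && decide (k e < hi)) = [] := by
    rw [List.drop_drop, List.filter_eq_nil_iff]
    intro e he
    rw [List.mem_drop_iff_getElem] at he
    obtain ⟨j, hj, rfl⟩ := he
    have := (hB (ia + (ib - ia) + j) (by omega)).2 (by omega)
    simp only [Bool.and_eq_true, decide_eq_true_eq, not_and]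
    omega
  have h2 : ((l.drop ia).take (ib - ia)).filter (fun e => decide (lo < k e) && decide (k e < hi))
      = (l.drop ia).take (ib - ia) := by
    rw [List.filter_eq_self]
    intro e he
    rw [List.mem_take_iff_getElem] at he
    obtain ⟨j, hj, rfl⟩ := he
    have hjlen : ia + j < l.length := by
      have := List.length_drop (l := l) (i := ia)
      omega
    rw [List.getElem_drop]
    have hu := (hA (ia + j) hjlen).2 (by omega)
    have hv := (hB (ia + j) hjlen).1 (by omega)
    simp only [Bool.and_eq_true, decide_eq_true_eq]
    omega
  rw [h1, h2, h3]
  simp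

-- pointwise: A's per-pair value for a non-vertical first segment, in B's predicate shape
theorem gA_horiz (p q : Int × Int) (e : Nat × (Int × Int) × (Int × Int)) (hpq : p.1 ≠ q.1) :
    gA p q e =
      if (decide ((if p.1 < q.1 then p.1 else q.1) < e.2.1.1) &&
          decide (e.2.1.1 < (if p.1 < q.1 then q.1 else p.1))) &&
         ((e.2.1.2 < p.2 && p.2 < e.2.2.2) || (e.2.2.2 < p.2 && p.2 < e.2.1.2)) then
        [(e.2.1.1, if p.2 == q.2 then p.2 else e.2.1.2)]
      else [] := by
  rcases p with ⟨px, py⟩; rcases q with ⟨qx, qy⟩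
  rcases e with ⟨j, ⟨rx, ry⟩, ⟨sx, sy⟩⟩
  simp only at hpq
  simp only [gA, getIntersectionPoint, mkLineA, LineA.isX]
  simp only [bne_iff_ne, ne_eq, hpq, not_false_eq_true, if_true, gt_iff_lt, beq_iff_eq,
    Bool.and_eq_true, Bool.or_eq_true, decide_eq_true_eq]
  split_ifs <;> simp_all <;> omega

-- pointwise: A's per-pair value for a vertical first segment, in B's predicate shape
theorem gA_vert (p q : Int × Int) (e : Nat × (Int × Int) × (Int × Int)) (hpq : p.1 = q.1) :
    gA p q e =
      if (e.2.1.1 != e.2.2.1) &&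
         (((e.2.1.1 < p.1 && p.1 < e.2.2.1) || (e.2.2.1 < p.1 && p.1 < e.2.1.1)) &&
          ((p.2 < e.2.1.2 && e.2.1.2 < q.2) || (q.2 < e.2.1.2 && e.2.1.2 < p.2))) then
        [(p.1, e.2.1.2)]
      else [] := by
  rcases p with ⟨px, py⟩; rcases q with ⟨qx, qy⟩
  rcases e with ⟨j, ⟨rx, ry⟩, ⟨sx, sy⟩⟩
  simp only at hpq
  subst hpq
  simp only [gA, getIntersectionPoint, mkLineA, LineA.isX]
  simp only [bne_self_eq_false, Bool.false_eq_true, if_false, bne_iff_ne, ne_eq, gt_iff_lt,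
    beq_self_eq_true, if_true, beq_iff_eq, Bool.and_eq_true, Bool.or_eq_true, decide_eq_true_eq]
  split_ifs <;> simp_all <;> omega

-- A's inner loop over range(len(line2)-1) emits exactly the per-pair blocks of pvSegs2
theorem inner_A (p q : Int × Int) (line2 : List (Int × Int)) (init : List (Int × Int)) :
    (List.range (line2.length - 1)).foldl (fun points j =>
      match getIntersectionPoint (mkLineA p q)
              (mkLineA (line2.getD j (0, 0)) (line2.getD (j + 1) (0, 0))) with
      | some r => points ++ [r]
      | none => points) init
    = init ++ (pvSegs2 line2).flatMap (gA p q) := by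
  have hfun : (fun (points : List (Int × Int)) (j : Nat) =>
      match getIntersectionPoint (mkLineA p q)
              (mkLineA (line2.getD j (0, 0)) (line2.getD (j + 1) (0, 0))) with
      | some r => points ++ [r]
      | none => points)
      = fun points j => points ++ gA p q (j, line2.getD j (0, 0), line2.getD (j + 1) (0, 0)) := by
    funext points j
    unfold gA
    cases getIntersectionPoint (mkLineA p q)
      (mkLineA (line2.getD j (0, 0)) (line2.getD (j + 1) (0, 0))) <;> simp
  rw [hfun, PySem.List.foldl_append_eq_flatMap]
  unfold pvSegs2
  rw [List.flatMap_map]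

-- pvSegs2 carries strictly increasing indices
theorem segs2_pairwise (line2 : List (Int × Int)) :
    (pvSegs2 line2).Pairwise (fun e f => e.1 < f.1) := by
  unfold pvSegs2
  rw [List.pairwise_map]
  exact List.pairwise_lt_range

-- the per-segment block of B's bisect-query branch equals A's block (first segment not vertical)
theorem block_horiz (p q : Int × Int) (line2 : List (Int × Int)) (hpq : p.1 ≠ q.1) :
    (PySem.List.sorted
      (((PySem.List.sorted (pvSegs2 line2) (fun e => e.2.1.1)).drop
          (PySem.List.bisectRight ((PySem.List.sorted (pvSegs2 line2) (fun e => e.2.1.1)).map (fun e => e.2.1.1))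
            (if p.1 < q.1 then p.1 else q.1))).take
          (PySem.List.bisectLeft ((PySem.List.sorted (pvSegs2 line2) (fun e => e.2.1.1)).map (fun e => e.2.1.1))
            (if p.1 < q.1 then q.1 else p.1)
           - PySem.List.bisectRight ((PySem.List.sorted (pvSegs2 line2) (fun e => e.2.1.1)).map (fun e => e.2.1.1))
            (if p.1 < q.1 then p.1 else q.1))
        |>.foldl (fun h e =>
          if (e.2.1.2 < p.2 && p.2 < e.2.2.2) || (e.2.2.2 < p.2 && p.2 < e.2.1.2) then
            h ++ [(e.1, (e.2.1.1, if p.2 == q.2 then p.2 else e.2.1.2))]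
          else h) [])
      (fun e => e.1)).map (fun e => e.2)
    = (pvSegs2 line2).flatMap (gA p q) := by
  set segs2 := pvSegs2 line2 with hsegs2
  set byx := PySem.List.sorted segs2 (fun e => e.2.1.1) with hbyx
  set xs := byx.map (fun e => e.2.1.1) with hxs
  set lo := if p.1 < q.1 then p.1 else q.1 with hlo
  set hi := if p.1 < q.1 then q.1 else p.1 with hhi
  have hlh : lo < hi := by rw [hlo, hhi]; split_ifs <;> omega
  have hpair : byx.Pairwise (fun e f => e.2.1.1 ≤ f.2.1.1) :=
    PySem.List.sorted_pairwise segs2 (fun e => e.2.1.1)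
  have hxs_pair : xs.Pairwise (fun x y => x ≤ y) := by
    rw [hxs, List.pairwise_map]; exact hpair
  have hxslen : xs.length = byx.length := by rw [hxs, List.length_map]
  have hxsget : ∀ (j : Nat) (hj : j < byx.length), xs[j]'(by omega) = byx[j].2.1.1 := by
    intro j hj; simp [hxs]
  obtain ⟨hbr_le, hbr_lo, hbr_hi⟩ := PySem.List.bisectRight_spec xs lo hxs_pair
  obtain ⟨hbl_le, hbl_lo, hbl_hi⟩ := PySem.List.bisectLeft_spec xs hi hxs_pair
  -- the slice is a filter of byx
  have hcand : (byx.drop (PySem.List.bisectRight xs lo)).take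
      (PySem.List.bisectLeft xs hi - PySem.List.bisectRight xs lo)
      = byx.filter (fun e => decide (lo < e.2.1.1) && decide (e.2.1.1 < hi)) := by
    apply drop_take_eq_filter byx (fun e => e.2.1.1) lo hi _ _ (by omega) (by omega) hlh
    · intro j hj
      constructor
      · intro hja
        have := hbr_lo j (by omega) hja
        rw [hxsget j hj] at this; omega
      · intro hja
        have := hbr_hi j (by omega) hja
        rw [hxsget j hj] at this; omega
    · intro j hj
      constructor
      · intro hjb
        have := hbl_lo j (by omega) hjb
        rw [hxsget j hj] at this; omega
      · intro hjb
        have := hbl_hi j (by omega) hjb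
        rw [hxsget j hj] at this; omega
  rw [hcand, PySem.List.foldl_append_if, List.nil_append, List.filter_filter]
  -- name the full predicate and the emitted entry
  set P : (Nat × (Int × Int) × (Int × Int)) → Bool := fun e =>
    (decide (lo < e.2.1.1) && decide (e.2.1.1 < hi)) &&
    ((e.2.1.2 < p.2 && p.2 < e.2.2.2) || (e.2.2.2 < p.2 && p.2 < e.2.1.2)) with hP
  set fh : (Nat × (Int × Int) × (Int × Int)) → Nat × (Int × Int) := fun e =>
    (e.1, (e.2.1.1, if p.2 == q.2 then p.2 else e.2.1.2)) with hfh
  have hplug : (byx.filter (fun e =>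
      ((e.2.1.2 < p.2 && p.2 < e.2.2.2) || (e.2.2.2 < p.2 && p.2 < e.2.1.2)) &&
      (decide (lo < e.2.1.1) && decide (e.2.1.1 < hi)))).map fh
      = (byx.filter P).map fh := by
    congr 1
    apply List.filter_congr
    intro e _
    rw [hP]
    cases h1 : (decide (lo < e.2.1.1) && decide (e.2.1.1 < hi)) <;>
      cases h2 : ((e.2.1.2 < p.2 && p.2 < e.2.2.2) || (e.2.2.2 < p.2 && p.2 < e.2.1.2)) <;> simp [h1, h2]
  rw [hplug]
  -- sorting by index restores the segs2 order
  have hsorted : PySem.List.sorted ((byx.filter P).map fh) (fun e => e.1)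
      = (segs2.filter P).map fh := by
    apply PySem.List.sorted_eq_of_perm_of_pairwise_lt
    · exact List.Perm.map fh (List.Perm.filter P ((PySem.List.sorted_perm segs2 (fun e => e.2.1.1) false).symm))
    · have h1 : (segs2.filter P).Pairwise (fun e f => e.1 < f.1) :=
        List.Pairwise.filter P (segs2_pairwise line2)
      rw [List.pairwise_map]
      exact h1.imp (by intro e f h; rw [hfh]; simpa using h)
  rw [hsorted, List.map_map]
  symm
  apply flatMap_eq_filter_map
  intro e _
  rw [gA_horiz p q e hpq, hP, hfh, hlo, hhi]
  rfl

-- the per-segment block of B's prefiltered scan equals A's block (first segment vertical)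
theorem block_vert (p q : Int × Int) (line2 : List (Int × Int))
    (points : List (Int × Int)) (hpq : p.1 = q.1) :
    ((pvSegs2 line2).filter (fun e => e.2.1.1 != e.2.2.1)).foldl (fun pts e =>
        if ((e.2.1.1 < p.1 && p.1 < e.2.2.1) || (e.2.2.1 < p.1 && p.1 < e.2.1.1)) &&
           ((p.2 < e.2.1.2 && e.2.1.2 < q.2) || (q.2 < e.2.1.2 && e.2.1.2 < p.2)) then
          pts ++ [(p.1, e.2.1.2)]
        else pts) points
    = points ++ (pvSegs2 line2).flatMap (gA p q) := by
  rw [PySem.List.foldl_append_if, List.filter_filter]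
  congr 1
  symm
  apply flatMap_eq_filter_map
  intro e _
  rw [gA_vert p q e hpq]
  cases h1 : (e.2.1.1 != e.2.2.1) <;>
    cases h2 : (((e.2.1.1 < p.1 && p.1 < e.2.2.1) || (e.2.2.1 < p.1 && p.1 < e.2.1.1)) &&
      ((p.2 < e.2.1.2 && e.2.1.2 < q.2) || (q.2 < e.2.1.2 && e.2.1.2 < p.2))) <;> simp_all

theorem main_eq (line1 line2 : List (Int × Int)) :
    calculateIntersectionPoints line1 line2 = calculateIntersectionPoints_alt line1 line2 := by
  unfold calculateIntersectionPoints calculateIntersectionPoints_alt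
  congr 1
  funext points i
  set p := line1.getD i (0, 0) with hp
  set q := line1.getD (i + 1) (0, 0) with hq
  rw [inner_A p q line2 points]
  by_cases hpq : p.1 = q.1
  · rw [if_neg (by simp [hpq])]
    exact (block_vert p q line2 points hpq).symm
  · rw [if_pos (by simp [hpq])]
    exact (congrArg (fun z => points ++ z) (block_horiz p q line2 hpq)).symm

-- ===== VERDICT (by name: the statement is the Claim_ definition above) =====
theorem calculateIntersectionPoints_spec : Claim_equal_calculateIntersectionPoints := by
  intro line1 line2 _
  unfold Spec_calculateIntersectionPoints
  exact main_eq line1 line2
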